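-- pv_equiv track=rewrite | github.com/leonhma/bwinf-40-2 | a2-Rechenrätsel/get_permutations_cl.py | count_indices_up_to
-- ===== SOURCE A (Python) =====
-- from typing import Generator, List
--
-- def count_indices_up_to(maxindices: List[int]) -> Generator[List[int], None, None]:
--     """
--     Generate all indices up to the given maximum indices.
--
--     Parameters
--     ----------
--     maxindices : List[int]
--         The maximum indices.
--
--     Returns
--     -------
--     Generator[List[int], None, None]
--         The indices.
--
--     """
--     indices = [0] * len(maxindices)
--     while True:
--         yield indices.copy()
--         def count_up():
--             for e, i in enumerate(indices):
--                 if i == maxindices[e]: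
--                     indices[e] = 0
--                 else:
--                     indices[e] += 1
--                     break
--         if(indices == maxindices):
--             break
--         count_up()
-- ===== SOURCE B (Python) =====
-- from itertools import product
-- from typing import Generator, List
--
--
-- def count_indices_up_to(maxindices: List[int]) -> Generator[List[int], None, None]:
--     """Generate all index tuples up to the given maxima (index 0 varies fastest)."""
--     ranges = [range(m + 1) for m in reversed(maxindices)]
--     for combo in product(*ranges):
--         yield list(reversed(combo))
-- ===== Notes on version B (the rewrite author's own statement) =====
-- stated objective: idiomatic
-- what changed: Replaces the stateful while-True odometer (shared mutable indices list, nested count_up with manual carry/reset) by a declarative itertools.product over reversed ranges, reversing each combo to keep A's little-endian order.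
import Mathlib
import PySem

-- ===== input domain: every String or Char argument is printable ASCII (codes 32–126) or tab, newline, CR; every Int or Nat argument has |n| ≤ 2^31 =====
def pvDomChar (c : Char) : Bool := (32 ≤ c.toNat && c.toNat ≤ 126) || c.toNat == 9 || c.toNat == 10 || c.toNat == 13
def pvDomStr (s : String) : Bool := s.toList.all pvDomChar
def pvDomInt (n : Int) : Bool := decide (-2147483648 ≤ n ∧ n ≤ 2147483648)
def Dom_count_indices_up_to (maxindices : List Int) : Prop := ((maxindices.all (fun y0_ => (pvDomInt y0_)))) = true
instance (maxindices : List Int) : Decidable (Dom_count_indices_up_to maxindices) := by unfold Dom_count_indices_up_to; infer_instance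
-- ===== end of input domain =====

-- B replaces A's stateful while-True odometer (shared mutable indices, manual carry/reset) by a
-- declarative Cartesian product of reversed ranges, reversed per tuple (idiomatic; same cost).

-- ===== PORT A =====
-- count_up: walk the odometer digits (index 0 first); a digit at its maximum resets to 0 and the
-- walk continues (the carry), otherwise it is incremented and the walk breaks.
def pvCountUpA : List Int → List Int → List Int
  | m :: ms, i :: is => if i = m then 0 :: pvCountUpA ms is else (i + 1) :: is
  | _, is => is

-- fuel for the 'while True' loop: the number of tuples emitted, sufficient under Pre_ (proved below)
def pvFuelA (maxindices : List Int) : Nat :=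
  (maxindices.map (fun m => (m + 1).toNat)).prod

-- one loop iteration: 'yield indices.copy(); if indices == maxindices: break; count_up()'
def pvLoopA (ms : List Int) (idx : List Int) : Nat → List (List Int)
  | 0 => []
  | fuel + 1 => idx :: (if idx = ms then [] else pvLoopA ms (pvCountUpA ms idx) fuel)

def count_indices_up_to (maxindices : List Int) : List (List Int) :=
  pvLoopA maxindices (List.replicate maxindices.length 0) (pvFuelA maxindices)

-- ===== PORT B =====
-- itertools.product(*lists): first list varies slowest, last list varies fastest
def pvProdL : List (List Int) → List (List Int)
  | [] => [[]]
  | xs :: rest => xs.flatMap (fun x => (pvProdL rest).map (x :: ·))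

def count_indices_up_to_alt (maxindices : List Int) : List (List Int) :=
  (pvProdL (maxindices.reverse.map (fun m => PySem.List.pyRange 0 (m + 1) 1))).map List.reverse

-- ===== PRECONDITION & SPEC =====
-- Pre_ excludes inputs with a negative entry: there A's generator is infinite (the odometer can
-- never equal maxindices), so exhausting A diverges and A returns no finite list.
def Pre_count_indices_up_to (maxindices : List Int) : Prop := ∀ m ∈ maxindices, 0 ≤ m
instance (maxindices : List Int) : Decidable (Pre_count_indices_up_to maxindices) := by unfold Pre_count_indices_up_to; infer_instance

def pvWitness_count_indices_up_to : List Int := [1, 2]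

def Spec_count_indices_up_to (maxindices : List Int) (out : List (List Int)) : Prop := out = count_indices_up_to_alt maxindices
instance (maxindices : List Int) (out : List (List Int)) : Decidable (Spec_count_indices_up_to maxindices out) := by unfold Spec_count_indices_up_to; infer_instance

-- ===== CLAIM (what is proved, stated in full; the proofs are below) =====
def Claim_equal_count_indices_up_to : Prop := ∀ (maxindices : List Int), Dom_count_indices_up_to maxindices → Pre_count_indices_up_to maxindices → Spec_count_indices_up_to maxindices (count_indices_up_to maxindices)

-- ===== LEMMAS AND PROOFS =====

-- valid odometer state: same length as the maxima, every digit within [0, max]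
def pvValid : List Int → List Int → Prop
  | m :: ms, i :: is => 0 ≤ i ∧ i ≤ m ∧ pvValid ms is
  | [], [] => True
  | _, _ => False

-- the outputs A still produces from a given odometer state onward
def pvSpecFrom : List Int → List Int → List (List Int)
  | m :: ms, i :: is =>
      ((PySem.List.pyRange i (m + 1) 1).map (· :: is)) ++
        ((pvSpecFrom ms is).tail.flatMap (fun t => (PySem.List.pyRange 0 (m + 1) 1).map (· :: t)))
  | _, _ => [[]]

theorem pvValid_countUp : ∀ (ms is : List Int), pvValid ms is → pvValid ms (pvCountUpA ms is) := by
  intro ms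
  induction ms with
  | nil => intro is h; cases is <;> simp_all [pvValid, pvCountUpA]
  | cons m ms ih =>
      intro is h
      cases is with
      | nil => simp [pvValid] at h
      | cons i is =>
          obtain ⟨h0, h1, h2⟩ := h
          by_cases hi : i = m
          · simp [pvCountUpA, hi, pvValid]
            exact ⟨by omega, ih is h2⟩
          · simp [pvCountUpA, hi, pvValid]
            exact ⟨by omega, by omega, h2⟩

theorem pvSpecFrom_step : ∀ (ms st : List Int), pvValid ms st →
    pvSpecFrom ms st = st :: (if st = ms then [] else pvSpecFrom ms (pvCountUpA ms st)) := by
  intro ms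
  induction ms with
  | nil =>
      intro st h
      cases st with
      | nil => simp [pvSpecFrom]
      | cons i is => simp [pvValid] at h
  | cons m ms ih =>
      intro st h
      cases st with
      | nil => simp [pvValid] at h
      | cons i is =>
          obtain ⟨h0, h1, h2⟩ := h
          have hr : PySem.List.pyRange i (m + 1) 1 = i :: PySem.List.pyRange (i + 1) (m + 1) 1 :=
            PySem.List.pyRange_one_cons (by omega)
          by_cases hi : i = m
          · subst hi
            have hr2 : PySem.List.pyRange (i + 1) (i + 1) 1 = [] :=
              PySem.List.pyRange_one_eq_nil (by omega)
            by_cases his : is = ms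
            · subst his
              simp [pvSpecFrom, hr, hr2, ih is h2]
            · have hcu := pvValid_countUp ms is h2
              have hstep := ih is h2
              have hstep2 := ih (pvCountUpA ms is) hcu
              have hne : (i :: is) ≠ (i :: ms) := by simp [his]
              have hcu0 : pvCountUpA (i :: ms) (i :: is) = 0 :: pvCountUpA ms is := by
                simp [pvCountUpA]
              simp only [pvSpecFrom, hr, hr2, List.map_cons, List.map_nil, List.cons_append,
                List.nil_append, hne, ite_false, hcu0]
              rw [hstep]
              simp only [his, ite_false, List.tail_cons]
              rw [hstep2]
              simp [List.flatMap_cons]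
          · have hne : (i :: is) ≠ (m :: ms) := by simp [hi]
            simp only [pvSpecFrom, hr, List.map_cons, List.cons_append, hne, ite_false,
              pvCountUpA, hi]

theorem pvSpecFrom_len : ∀ (ms st : List Int), pvValid ms st →
    (pvSpecFrom ms st).length ≤ pvFuelA ms := by
  intro ms
  induction ms with
  | nil =>
      intro st h
      cases st with
      | nil => simp [pvSpecFrom, pvFuelA]
      | cons i is => simp [pvValid] at h
  | cons m ms ih =>
      intro st h
      cases st with
      | nil => simp [pvValid] at h
      | cons i is =>
          obtain ⟨h0, h1, h2⟩ := h
          have hL1 : 1 ≤ (pvSpecFrom ms is).length := by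
            rw [pvSpecFrom_step ms is h2]; simp
          have hLF := ih is h2
          have hlen : (pvSpecFrom (m :: ms) (i :: is)).length =
              (m + 1 - i).toNat + ((pvSpecFrom ms is).length - 1) * (m + 1).toNat := by
            simp [pvSpecFrom, List.length_flatMap, PySem.List.length_pyRange_one,
              Function.comp, List.map_const', List.sum_replicate, smul_eq_mul,
              Nat.mul_comm]
          rw [hlen]
          have ht : (m + 1 - i).toNat ≤ (m + 1).toNat := by omega
          obtain ⟨l, hl⟩ : ∃ l, (pvSpecFrom ms is).length = l + 1 :=
            ⟨(pvSpecFrom ms is).length - 1, by omega⟩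
          rw [hl]
          simp only [Nat.add_sub_cancel]
          have : (m + 1 - i).toNat + l * (m + 1).toNat ≤ (l + 1) * (m + 1).toNat := by
            calc (m + 1 - i).toNat + l * (m + 1).toNat
                ≤ (m + 1).toNat + l * (m + 1).toNat := Nat.add_le_add_right ht _
              _ = (l + 1) * (m + 1).toNat := by ring
          calc (m + 1 - i).toNat + l * (m + 1).toNat
              ≤ (l + 1) * (m + 1).toNat := this
            _ ≤ pvFuelA ms * (m + 1).toNat := Nat.mul_le_mul_right _ (by omega)
            _ = pvFuelA (m :: ms) := by simp [pvFuelA, Nat.mul_comm]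

theorem pvLoopA_eq : ∀ (fuel : Nat) (ms st : List Int), pvValid ms st →
    (pvSpecFrom ms st).length ≤ fuel → pvLoopA ms st fuel = pvSpecFrom ms st := by
  intro fuel
  induction fuel with
  | zero =>
      intro ms st hv hlen
      rw [pvSpecFrom_step ms st hv] at hlen
      simp at hlen
  | succ fuel ih =>
      intro ms st hv hlen
      rw [pvSpecFrom_step ms st hv] at hlen ⊢
      by_cases hst : st = ms
      · simp [pvLoopA, hst]
      · simp only [hst, ite_false, List.length_cons] at hlen
        simp only [pvLoopA, hst, ite_false]
        rw [ih ms (pvCountUpA ms st) (pvValid_countUp ms st hv) (by omega)]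

theorem pvProdL_snoc : ∀ (ls : List (List Int)) (xs : List Int),
    pvProdL (ls ++ [xs]) = (pvProdL ls).flatMap (fun t => xs.map (fun x => t ++ [x])) := by
  intro ls
  induction ls with
  | nil =>
      intro xs
      simp only [List.nil_append, pvProdL]
      induction xs <;> simp_all [pvProdL]
  | cons ys ls ih =>
      intro xs
      simp only [List.cons_append, pvProdL, ih]
      simp [List.map_flatMap, List.flatMap_map, List.flatMap_assoc, List.map_map,
        Function.comp_def, List.cons_append]

theorem pvAltRec (m : Int) (ms : List Int) :
    count_indices_up_to_alt (m :: ms) =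
      (count_indices_up_to_alt ms).flatMap
        (fun t => (PySem.List.pyRange 0 (m + 1) 1).map (· :: t)) := by
  unfold count_indices_up_to_alt
  rw [List.reverse_cons, List.map_append, List.map_singleton, pvProdL_snoc]
  simp [List.map_flatMap, List.flatMap_map, List.map_map, Function.comp_def,
    List.reverse_append]

theorem pvAlt_head (ms : List Int) (h : ∀ m ∈ ms, 0 ≤ m) :
    count_indices_up_to_alt ms =
      List.replicate ms.length 0 :: (count_indices_up_to_alt ms).tail := by
  induction ms with
  | nil => rfl
  | cons m ms ih =>
      have h0 : (0 : Int) ≤ m := h m (by simp)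
      have ih' := ih (fun x hx => h x (by simp [hx]))
      rw [pvAltRec, ih']
      have hr : PySem.List.pyRange 0 (m + 1) 1 = 0 :: PySem.List.pyRange 1 (m + 1) 1 :=
        PySem.List.pyRange_one_cons (by omega)
      simp [hr, List.flatMap_cons, List.replicate_succ]

theorem pvValid_zeros : ∀ (ms : List Int), (∀ m ∈ ms, 0 ≤ m) →
    pvValid ms (List.replicate ms.length 0) := by
  intro ms
  induction ms with
  | nil => intro _; simp [pvValid]
  | cons m ms ih =>
      intro h
      simp only [List.length_cons, List.replicate_succ, pvValid]
      exact ⟨le_refl 0, h m (by simp), ih (fun x hx => h x (by simp [hx]))⟩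

theorem pvSpecFrom_zeros : ∀ (ms : List Int), (∀ m ∈ ms, 0 ≤ m) →
    pvSpecFrom ms (List.replicate ms.length 0) = count_indices_up_to_alt ms := by
  intro ms
  induction ms with
  | nil => intro _; rfl
  | cons m ms ih =>
      intro h
      have h' : ∀ x ∈ ms, (0 : Int) ≤ x := fun x hx => h x (by simp [hx])
      simp only [List.length_cons, List.replicate_succ, pvSpecFrom]
      rw [ih h', pvAltRec, pvAlt_head ms h']
      simp [List.flatMap_cons]

-- ===== VERDICT (by name: the statement is the Claim_ definition above) =====
theorem count_indices_up_to_spec : Claim_equal_count_indices_up_to := by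
  intro ms _ hpre
  unfold Spec_count_indices_up_to count_indices_up_to
  rw [pvLoopA_eq (pvFuelA ms) ms _ (pvValid_zeros ms hpre)
      (pvSpecFrom_len ms _ (pvValid_zeros ms hpre))]
  exact pvSpecFrom_zeros ms hpre
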